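-- pv_equiv track=rewrite | github.com/norman-gamage/leetcode | Python/1637.py | maxWidthOfVerticalArea
-- ===== SOURCE A (Python) =====
-- from typing import List
--
-- def maxWidthOfVerticalArea(points: List[List[int]]) -> int:
--   arr = list(map(lambda a: a[0], points))
--   arr.sort()
--   _max = 0
--
--   for i in range(1, len(arr)):
--     if (arr[i] == arr[i - 1]):
--       continue
--
--     _max = max(_max, arr[i] - arr[i - 1])
--
--   return _max
-- ===== SOURCE B (Python) =====
-- from typing import List
--
-- def maxWidthOfVerticalArea(points: List[List[int]]) -> int:
--   xs = [p[0] for p in points]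
--   if not xs:
--     return 0
--   def gap(ys):
--     lo, hi = min(ys), max(ys)
--     if lo == hi:
--       return 0
--     mid = (lo + hi) // 2
--     left = [y for y in ys if y <= mid]
--     right = [y for y in ys if y > mid]
--     return max(gap(left), gap(right), min(right) - max(left))
--   return gap(xs)
-- ===== Notes on version B (the rewrite author's own statement) =====
-- stated objective: alternative
-- what changed: B never sorts: it computes the maximum gap by divide and conquer on the value range, bisecting [min,max] at the midpoint, partitioning the x-coordinates, and combining max(gap(left), gap(right), min(right)-max(left)), replacing A's sort followed by an index loop over adjacent pairs.
import Mathlib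
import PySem

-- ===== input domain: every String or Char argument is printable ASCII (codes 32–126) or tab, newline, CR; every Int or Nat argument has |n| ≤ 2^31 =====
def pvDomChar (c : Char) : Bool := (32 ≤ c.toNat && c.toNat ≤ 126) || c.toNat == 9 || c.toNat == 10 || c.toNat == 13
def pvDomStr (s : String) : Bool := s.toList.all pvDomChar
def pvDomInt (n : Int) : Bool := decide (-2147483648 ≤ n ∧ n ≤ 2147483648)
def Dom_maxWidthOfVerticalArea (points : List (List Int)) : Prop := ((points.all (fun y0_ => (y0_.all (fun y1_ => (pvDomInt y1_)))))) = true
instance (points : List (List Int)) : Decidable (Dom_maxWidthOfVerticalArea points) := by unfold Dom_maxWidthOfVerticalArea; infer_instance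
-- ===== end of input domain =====

-- B computes the maximum gap without sorting, by divide and conquer on the value range
-- (bisect [min,max], partition, combine with the cross gap min(right)-max(left)); same result.

-- ===== PORT A =====
def maxWidthOfVerticalArea (points : List (List Int)) : Int :=
  let arr := PySem.List.sorted (points.map (fun a => PySem.List.pyGetD a 0 0)) (fun x => x) false
  (PySem.List.pyRange 1 (arr.length : Int) 1).foldl
    (fun m i =>
      if PySem.List.pyGetD arr i 0 = PySem.List.pyGetD arr (i - 1) 0 then m
      else max m (PySem.List.pyGetD arr i 0 - PySem.List.pyGetD arr (i - 1) 0)) 0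

-- ===== PORT B =====
-- termination facts for pvGap's value-range bisection (cited in decreasing_by)
theorem pv_meas_left (ys : List Int) (lo hi : Int)
    (hlo : PySem.List.min? ys (fun y => y) = some lo)
    (hhi : PySem.List.max? ys (fun y => y) = some hi) (h : lo ≠ hi) :
    ((PySem.List.max? (ys.filter (fun y => decide (y ≤ PySem.Int.floordiv (lo + hi) 2))) (fun y => y)).getD 0
      - (PySem.List.min? (ys.filter (fun y => decide (y ≤ PySem.Int.floordiv (lo + hi) 2))) (fun y => y)).getD 0).toNat
      < (hi - lo).toNat := by
  set mid := PySem.Int.floordiv (lo + hi) 2 with hmid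
  have hlomem : lo ∈ ys := PySem.List.min?_mem hlo
  have hloall : ∀ y ∈ ys, lo ≤ y := fun y hy => PySem.List.min?_isMin hlo y hy
  have hhiall : ∀ y ∈ ys, y ≤ hi := fun y hy => PySem.List.max?_isMax hhi y hy
  have hlt : lo < hi := lt_of_le_of_ne (hhiall lo hlomem) h
  have hb : lo ≤ mid := (PySem.Int.floordiv_two_mid_bounds (le_of_lt hlt)).1
  have hmidlt : mid < hi := by
    rw [hmid, PySem.Int.floordiv_lt_iff_lt_mul (by norm_num)]; omega
  have hne : lo ∈ ys.filter (fun y => decide (y ≤ mid)) :=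
    List.mem_filter.mpr ⟨hlomem, by simpa using hb⟩
  cases hM : PySem.List.max? (ys.filter (fun y => decide (y ≤ mid))) (fun y => y) with
  | none =>
    exact absurd (((PySem.List.max?_eq_none_iff _ _).mp hM)) (List.ne_nil_of_mem hne)
  | some M =>
    cases hm : PySem.List.min? (ys.filter (fun y => decide (y ≤ mid))) (fun y => y) with
    | none =>
      exact absurd (((PySem.List.min?_eq_none_iff _ _).mp hm)) (List.ne_nil_of_mem hne)
    | some m =>
      have hMmem := PySem.List.max?_mem hM
      have hmmem := PySem.List.min?_mem hm
      have hMle : M ≤ mid := by simpa using (List.mem_filter.mp hMmem).2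
      have hmge : lo ≤ m := hloall m (List.mem_filter.mp hmmem).1
      simp only [Option.getD_some]
      omega

theorem pv_meas_right (ys : List Int) (lo hi : Int)
    (hlo : PySem.List.min? ys (fun y => y) = some lo)
    (hhi : PySem.List.max? ys (fun y => y) = some hi) (h : lo ≠ hi) :
    ((PySem.List.max? (ys.filter (fun y => decide (PySem.Int.floordiv (lo + hi) 2 < y))) (fun y => y)).getD 0
      - (PySem.List.min? (ys.filter (fun y => decide (PySem.Int.floordiv (lo + hi) 2 < y))) (fun y => y)).getD 0).toNat
      < (hi - lo).toNat := by
  set mid := PySem.Int.floordiv (lo + hi) 2 with hmid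
  have hhimem : hi ∈ ys := PySem.List.max?_mem hhi
  have hloall : ∀ y ∈ ys, lo ≤ y := fun y hy => PySem.List.min?_isMin hlo y hy
  have hhiall : ∀ y ∈ ys, y ≤ hi := fun y hy => PySem.List.max?_isMax hhi y hy
  have hlt : lo < hi := lt_of_le_of_ne (hloall hi hhimem) h
  have hb : lo ≤ mid := (PySem.Int.floordiv_two_mid_bounds (le_of_lt hlt)).1
  have hmidlt : mid < hi := by
    rw [hmid, PySem.Int.floordiv_lt_iff_lt_mul (by norm_num)]; omega
  have hne : hi ∈ ys.filter (fun y => decide (mid < y)) :=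
    List.mem_filter.mpr ⟨hhimem, by simpa using hmidlt⟩
  cases hM : PySem.List.max? (ys.filter (fun y => decide (mid < y))) (fun y => y) with
  | none =>
    exact absurd (((PySem.List.max?_eq_none_iff _ _).mp hM)) (List.ne_nil_of_mem hne)
  | some M =>
    cases hm : PySem.List.min? (ys.filter (fun y => decide (mid < y))) (fun y => y) with
    | none =>
      exact absurd (((PySem.List.min?_eq_none_iff _ _).mp hm)) (List.ne_nil_of_mem hne)
    | some m =>
      have hMmem := PySem.List.max?_mem hM
      have hmmem := PySem.List.min?_mem hm
      have hMle : M ≤ hi := hhiall M (List.mem_filter.mp hMmem).1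
      have hmgt : mid < m := by simpa using (List.mem_filter.mp hmmem).2
      simp only [Option.getD_some]
      omega

-- rewrites the attach/unattach form the equation compiler gives recursive-call arguments back to a plain filter
theorem pv_uf (ys : List Int) (p : Int → Bool) :
    (List.filter (fun (x : {y // y ∈ ys}) => p x.val) ys.attach).unattach = ys.filter p := by
  rw [List.unattach]
  have h1 : (List.filter (fun x : {y // y ∈ ys} => p x.val) ys.attach)
      = List.filter (p ∘ Subtype.val) ys.attach := rfl
  have h2 : (List.map (fun (x : {y // y ∈ ys}) => x.val) ys.attach) = ys :=
    List.attach_map_subtype_val ys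
  rw [h1, ← List.filter_map, h2]

def pvGap (ys : List Int) : Int :=
  match hlo : PySem.List.min? ys (fun y => y), hhi : PySem.List.max? ys (fun y => y) with
  | some lo, some hi =>
    if h : lo = hi then 0
    else
      let mid := PySem.Int.floordiv (lo + hi) 2
      let left := ys.filter (fun y => decide (y ≤ mid))
      let right := ys.filter (fun y => decide (mid < y))
      max (max (pvGap left) (pvGap right))
        ((match PySem.List.min? right (fun y => y) with | some a => a | none => 0)
          - (match PySem.List.max? left (fun y => y) with | some a => a | none => 0))
  | _, _ => 0
termination_by ((PySem.List.max? ys (fun y => y)).getD 0 - (PySem.List.min? ys (fun y => y)).getD 0).toNat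
decreasing_by
  · rw [pv_uf ys (fun y => decide (y ≤ PySem.Int.floordiv (lo + hi) 2))]
    simpa [hlo, hhi] using pv_meas_left ys lo hi hlo hhi h
  · rw [pv_uf ys (fun y => decide (PySem.Int.floordiv (lo + hi) 2 < y))]
    simpa [hlo, hhi] using pv_meas_right ys lo hi hlo hhi h

def maxWidthOfVerticalArea_alt (points : List (List Int)) : Int :=
  let xs := points.map (fun p => PySem.List.pyGetD p 0 0)
  if xs = [] then 0 else pvGap xs

-- ===== PRECONDITION & SPEC =====
-- Pre_ excludes inputs containing an empty point, on which Python A raises IndexError at a[0].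
def Pre_maxWidthOfVerticalArea (points : List (List Int)) : Prop := ∀ p ∈ points, p ≠ []
instance (points : List (List Int)) : Decidable (Pre_maxWidthOfVerticalArea points) := by
  unfold Pre_maxWidthOfVerticalArea; infer_instance
def pvWitness_maxWidthOfVerticalArea : List (List Int) := [[3, 1], [9, 0], [1, 0], [1, 4], [5, 3], [8, 8]]
def Spec_maxWidthOfVerticalArea (points : List (List Int)) (out : Int) : Prop := out = maxWidthOfVerticalArea_alt points
instance (points : List (List Int)) (out : Int) : Decidable (Spec_maxWidthOfVerticalArea points out) := by unfold Spec_maxWidthOfVerticalArea; infer_instance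

-- ===== CLAIM (what is proved, stated in full; the proofs are below) =====
def Claim_equal_maxWidthOfVerticalArea : Prop := ∀ (points : List (List Int)), Dom_maxWidthOfVerticalArea points → Pre_maxWidthOfVerticalArea points → Spec_maxWidthOfVerticalArea points (maxWidthOfVerticalArea points)

-- ===== LEMMAS AND PROOFS =====

-- A's index loop reads exactly the adjacent pairs of the sorted array.
theorem pv_pairs_eq (s : List Int) :
    (PySem.List.pyRange 1 (s.length : Int) 1).map
      (fun i => (PySem.List.pyGetD s (i - 1) 0, PySem.List.pyGetD s i 0)) = s.zip s.tail := by
  rw [PySem.List.pyRange_one, List.map_map]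
  apply List.ext_getElem
  · simp [List.length_zip]
  · intro k h1 h2
    simp only [List.getElem_map, List.getElem_range, Function.comp_apply, List.getElem_zip]
    have hk : k + 1 < s.length := by
      simp at h1; omega
    have e1 : (1 : Int) + (k : Int) - 1 = ((k : Nat) : Int) := by ring
    have e2 : (1 : Int) + (k : Int) = (((k + 1) : Nat) : Int) := by push_cast; ring
    rw [e1, e2, PySem.List.pyGetD_natCast, PySem.List.pyGetD_natCast]
    simp [List.getD_eq_getElem?_getD, hk, Nat.lt_of_succ_lt hk, List.getElem_tail]

-- skipping equal neighbours = taking max with their zero difference, once the accumulator is ≥ 0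
theorem pv_foldSkip_eq_foldMax (ps : List (Int × Int)) : ∀ acc : Int, 0 ≤ acc →
    ps.foldl (fun m p => if p.2 = p.1 then m else max m (p.2 - p.1)) acc
      = ps.foldl (fun m p => max m (p.2 - p.1)) acc := by
  induction ps with
  | nil => intro acc h; rfl
  | cons p t ih =>
    intro acc h
    simp only [List.foldl_cons]
    by_cases hp : p.2 = p.1
    · rw [if_pos hp, hp, sub_self, max_eq_left h, ih acc h]
    · rw [if_neg hp, ih _ (le_trans h (le_max_left _ _))]

-- adjacent-duplicate removal (sorted list → strictly sorted list with the same members)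
def pvEdup : List Int → List Int
  | [] => []
  | [a] => [a]
  | a :: b :: t => if a = b then pvEdup (b :: t) else a :: pvEdup (b :: t)

theorem pv_edup_head (a : Int) (s : List Int) : ∃ t, pvEdup (a :: s) = a :: t := by
  induction s generalizing a with
  | nil => exact ⟨[], rfl⟩
  | cons b t ih =>
    by_cases h : a = b
    · obtain ⟨t', ht'⟩ := ih b
      exact ⟨t', by simp [pvEdup, h, ht']⟩
    · exact ⟨pvEdup (b :: t), by simp [pvEdup, h]⟩

theorem pv_edup_mem (x : Int) : ∀ s : List Int, x ∈ pvEdup s ↔ x ∈ s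
  | [] => by simp [pvEdup]
  | [a] => by simp [pvEdup]
  | a :: b :: t => by
    by_cases h : a = b
    · subst h
      simp [pvEdup, pv_edup_mem x (a :: t)]
    · simp [pvEdup, h, pv_edup_mem x (b :: t)]

theorem pv_edup_pairwise_lt : ∀ s : List Int, s.Pairwise (· ≤ ·) → (pvEdup s).Pairwise (· < ·)
  | [] => by simp [pvEdup]
  | [a] => by simp [pvEdup]
  | a :: b :: t => fun h => by
    obtain ⟨ha, hrest⟩ := List.pairwise_cons.mp h
    by_cases hab : a = b
    · simpa [pvEdup, hab] using pv_edup_pairwise_lt (b :: t) hrest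
    · simp only [pvEdup, if_neg hab]
      rw [List.pairwise_cons]
      refine ⟨?_, pv_edup_pairwise_lt (b :: t) hrest⟩
      intro x hx
      rw [pv_edup_mem] at hx
      have hab' : a ≤ b := ha b (by simp)
      rcases List.mem_cons.mp hx with rfl | hx
      · omega
      · have hb : b ≤ x := (List.pairwise_cons.mp hrest).1 x hx
        omega

-- dropping adjacent duplicates does not change the running max of adjacent differences
theorem pv_foldMax_edup : ∀ s : List Int, ∀ acc : Int, 0 ≤ acc →
    (s.zip s.tail).foldl (fun m p => max m (p.2 - p.1)) acc
      = ((pvEdup s).zip (pvEdup s).tail).foldl (fun m p => max m (p.2 - p.1)) acc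
  | [] => fun _ _ => rfl
  | [a] => fun _ _ => rfl
  | a :: b :: t => fun acc h => by
    by_cases hab : a = b
    · have := pv_foldMax_edup (b :: t) acc h
      simp only [pvEdup, if_pos hab, List.tail_cons, List.zip_cons_cons, List.foldl_cons]
      rw [hab, sub_self, max_eq_left h]
      simpa using this
    · obtain ⟨t', ht'⟩ := pv_edup_head b t
      have := pv_foldMax_edup (b :: t) (max acc (b - a)) (le_trans h (le_max_left _ _))
      simp only [pvEdup, if_neg hab, ht', List.tail_cons, List.zip_cons_cons, List.foldl_cons]
      rw [ht'] at this
      simpa using this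

-- the running max never goes below its start
theorem pv_foldMax_ge_init (ps : List (Int × Int)) : ∀ b : Int,
    b ≤ ps.foldl (fun m p => max m (p.2 - p.1)) b := by
  induction ps with
  | nil => intro b; simp
  | cons p t ih =>
    intro b
    simp only [List.foldl_cons]
    exact le_trans (le_max_left _ _) (ih _)

-- a nonnegative start factors out of the running max
theorem pv_foldMax_init (ps : List (Int × Int)) : ∀ b : Int, 0 ≤ b →
    ps.foldl (fun m p => max m (p.2 - p.1)) b
      = max b (ps.foldl (fun m p => max m (p.2 - p.1)) 0) := by
  induction ps with
  | nil => intro b hb; simp; omega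
  | cons p t ih =>
    intro b hb
    simp only [List.foldl_cons]
    rw [ih (max b (p.2 - p.1)) (le_trans hb (le_max_left _ _)),
        ih (max 0 (p.2 - p.1)) (le_max_left _ _)]
    have h0 : 0 ≤ t.foldl (fun m p => max m (p.2 - p.1)) 0 := pv_foldMax_ge_init t 0
    omega

-- adjacent pairs of a list split around a join point
theorem pv_pairs_concat : ∀ (as : List Int) (aL b : Int) (t2 : List Int),
    ((as ++ [aL]) ++ b :: t2).zip (((as ++ [aL]) ++ b :: t2).tail)
      = (as ++ [aL]).zip ((as ++ [aL]).tail) ++ (aL, b) :: (b :: t2).zip t2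
  | [], aL, b, t2 => by simp
  | a :: as, aL, b, t2 => by
    have ih := pv_pairs_concat as aL b t2
    cases as with
    | nil => simp
    | cons c as' =>
      simp only [List.cons_append, List.append_assoc, List.tail_cons, List.zip_cons_cons] at ih ⊢
      rw [ih]

-- the first minimal element of ys is THE minimum value; same for max
theorem pv_min_eq {ys : List Int} {m m' : Int}
    (h : PySem.List.min? ys (fun y => y) = some m)
    (hmem : m' ∈ ys) (hall : ∀ y ∈ ys, m' ≤ y) : m = m' :=
  le_antisymm (PySem.List.min?_isMin h m' hmem) (hall m (PySem.List.min?_mem h))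

theorem pv_max_eq {ys : List Int} {m m' : Int}
    (h : PySem.List.max? ys (fun y => y) = some m)
    (hmem : m' ∈ ys) (hall : ∀ y ∈ ys, y ≤ m') : m = m' :=
  le_antisymm (hall m (PySem.List.max?_mem h)) (PySem.List.max?_isMax h m' hmem)

-- a strictly sorted list splits as its ≤ mid prefix followed by its > mid suffix
theorem pv_split (mid : Int) : ∀ d : List Int, d.Pairwise (· < ·) →
    d.filter (fun y => decide (y ≤ mid)) ++ d.filter (fun y => decide (mid < y)) = d := by
  intro d hd
  induction d with
  | nil => rfl
  | cons a t ih =>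
    obtain ⟨ha, ht⟩ := List.pairwise_cons.mp hd
    by_cases h : a ≤ mid
    · have hna : ¬ (mid < a) := not_lt.mpr h
      simp [h, hna, ih ht]
    · have hlt' : mid < a := not_le.mp h
      have h1 : t.filter (fun y => decide (y ≤ mid)) = [] := by
        rw [List.filter_eq_nil_iff]
        intro y hy
        have := ha y hy
        simp; omega
      have h2 : t.filter (fun y => decide (mid < y)) = t := by
        rw [List.filter_eq_self]
        intro y hy
        have := ha y hy
        simp; omega
      simp [h, hlt', h1, h2]

-- pvGap computes the maximum adjacent gap of any strictly sorted list with the same members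
theorem pv_gap_eq : ∀ (n : Nat) (d ys : List Int), d.length ≤ n →
    (∀ x, x ∈ ys ↔ x ∈ d) → d.Pairwise (· < ·) →
    pvGap ys = (d.zip d.tail).foldl (fun m p => max m (p.2 - p.1)) 0 := by
  intro n
  induction n with
  | zero =>
    intro d ys hlen hmem _
    have hd : d = [] := List.length_eq_zero_iff.mp (Nat.le_zero.mp hlen)
    subst hd
    have hys : ys = [] := by
      cases ys with
      | nil => rfl
      | cons a t => exact absurd ((hmem a).mp (by simp)) (by simp)
    subst hys
    rw [pvGap.eq_def]
    rfl
  | succ n ih =>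
    intro d ys hlen hmem hpair
    rw [pvGap.eq_def]
    cases hys : ys with
    | nil =>
      have hd : d = [] := by
        cases d with
        | nil => rfl
        | cons a t => exact absurd ((hmem a).mpr (by simp)) (by simp [hys])
      subst hd
      rfl
    | cons y0 yt =>
      subst hys
      cases hlo : PySem.List.min? (y0 :: yt) (fun y => y) with
      | none => exact absurd ((PySem.List.min?_eq_none_iff _ _).mp hlo) (by simp)
      | some lo =>
      cases hhi : PySem.List.max? (y0 :: yt) (fun y => y) with
      | none => exact absurd ((PySem.List.max?_eq_none_iff _ _).mp hhi) (by simp)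
      | some hi =>
      set ys := y0 :: yt with hys'
      simp only []
      have hlomem : lo ∈ ys := PySem.List.min?_mem hlo
      have hloall : ∀ y ∈ ys, lo ≤ y := fun y hy => PySem.List.min?_isMin hlo y hy
      have hhimem : hi ∈ ys := PySem.List.max?_mem hhi
      have hhiall : ∀ y ∈ ys, y ≤ hi := fun y hy => PySem.List.max?_isMax hhi y hy
      by_cases h : lo = hi
      · rw [dif_pos h]
        -- every member of d equals lo, and d is strictly sorted and nonempty: d = [lo]
        have hall : ∀ x ∈ d, x = lo := by
          intro x hx
          have hx' := (hmem x).mpr hx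
          have := hloall x hx'
          have := hhiall x hx'
          omega
        cases d with
        | nil => exact absurd ((hmem lo).mp hlomem) (by simp)
        | cons a t =>
          have ha : a = lo := hall a (by simp)
          have ht : t = [] := by
            cases t with
            | nil => rfl
            | cons c t' =>
              have hc : c = lo := hall c (by simp)
              have := (List.pairwise_cons.mp hpair).1 c (by simp)
              omega
          subst ha ht
          rfl
      · rw [dif_neg h]
        have hlt : lo < hi := lt_of_le_of_ne (hhiall lo hlomem) h
        set mid := PySem.Int.floordiv (lo + hi) 2 with hmid
        have hmlo : lo ≤ mid := (PySem.Int.floordiv_two_mid_bounds (le_of_lt hlt)).1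
        have hmidlt : mid < hi := by
          rw [hmid, PySem.Int.floordiv_lt_iff_lt_mul (by norm_num)]; omega
        set left := ys.filter (fun y => decide (y ≤ mid)) with hleft
        set right := ys.filter (fun y => decide (mid < y)) with hright
        set dL := d.filter (fun y => decide (y ≤ mid)) with hdL
        set dR := d.filter (fun y => decide (mid < y)) with hdR
        have hsplit : dL ++ dR = d := pv_split mid d hpair
        have hpairL : dL.Pairwise (· < ·) := hpair.filter _
        have hpairR : dR.Pairwise (· < ·) := hpair.filter _
        have hmemL : ∀ x, x ∈ left ↔ x ∈ dL := by
          intro x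
          simp only [hleft, hdL, List.mem_filter, hmem x]
        have hmemR : ∀ x, x ∈ right ↔ x ∈ dR := by
          intro x
          simp only [hright, hdR, List.mem_filter, hmem x]
        have hLne : lo ∈ dL := by
          rw [hdL, List.mem_filter]
          exact ⟨(hmem lo).mp hlomem, by simpa using hmlo⟩
        have hRne : hi ∈ dR := by
          rw [hdR, List.mem_filter]
          exact ⟨(hmem hi).mp hhimem, by simpa using hmidlt⟩
        have hlend : dL.length + dR.length = d.length := by
          rw [← hsplit]; simp
        have hlenL : dL.length ≤ n := by
          have : 1 ≤ dR.length := List.length_pos_iff.mpr (List.ne_nil_of_mem hRne)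
          omega
        have hlenR : dR.length ≤ n := by
          have : 1 ≤ dL.length := List.length_pos_iff.mpr (List.ne_nil_of_mem hLne)
          omega
        have ihL : pvGap left = (dL.zip dL.tail).foldl (fun m p => max m (p.2 - p.1)) 0 :=
          ih dL left hlenL hmemL hpairL
        have ihR : pvGap right = (dR.zip dR.tail).foldl (fun m p => max m (p.2 - p.1)) 0 :=
          ih dR right hlenR hmemR hpairR
        -- dR = b :: tR, and b is the minimum of right
        obtain ⟨b, tR, hbtr⟩ : ∃ b tR, dR = b :: tR := by
          cases hdRc : dR with
          | nil => rw [hdRc] at hRne; simp at hRne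
          | cons b tR => exact ⟨b, tR, rfl⟩
        have hbmin : ∀ y ∈ right, b ≤ y := by
          intro y hy
          have hydr : y ∈ dR := (hmemR y).mp hy
          rw [hbtr] at hydr
          rcases List.mem_cons.mp hydr with rfl | hyt
          · exact le_refl _
          · have := (List.pairwise_cons.mp (hbtr ▸ hpairR)).1 y hyt
            omega
        have hbr : b ∈ right := (hmemR b).mpr (by rw [hbtr]; simp)
        have hminr : PySem.List.min? right (fun y => y) = some b := by
          cases hmr : PySem.List.min? right (fun y => y) with
          | none =>
            exact absurd ((PySem.List.min?_eq_none_iff _ _).mp hmr) (List.ne_nil_of_mem hbr)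
          | some m => rw [pv_min_eq hmr hbr hbmin]
        -- dL = as ++ [aL], and aL is the maximum of left
        obtain ⟨as, aL, hasal⟩ : ∃ as aL, dL = as ++ [aL] := by
          rcases List.eq_nil_or_concat dL with hnil | ⟨as, aL, hc⟩
          · rw [hnil] at hLne; simp at hLne
          · rw [List.concat_eq_append] at hc
            exact ⟨as, aL, hc⟩
        have haL : aL ∈ dL := by rw [hasal]; simp
        have haLmax : ∀ y ∈ left, y ≤ aL := by
          intro y hy
          have hydl : y ∈ dL := (hmemL y).mp hy
          rw [hasal] at hydl
          rcases List.mem_append.mp hydl with hyas | hyal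
          · have hp := hasal ▸ hpairL
            have := (List.pairwise_append.mp hp).2.2 y hyas aL (by simp)
            omega
          · simp at hyal; omega
        have haLl : aL ∈ left := (hmemL aL).mpr haL
        have hmaxl : PySem.List.max? left (fun y => y) = some aL := by
          cases hml : PySem.List.max? left (fun y => y) with
          | none =>
            exact absurd ((PySem.List.max?_eq_none_iff _ _).mp hml) (List.ne_nil_of_mem haLl)
          | some m => rw [pv_max_eq hml haLl haLmax]
        rw [hminr, hmaxl]
        simp only []
        -- compute the right-hand side by splitting d at the join
        rw [← hsplit, hbtr, hasal, pv_pairs_concat as aL b tR]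
        rw [hasal] at ihL
        rw [List.foldl_append, List.foldl_cons]
        have hg1 : 0 ≤ ((as ++ [aL]).zip (as ++ [aL]).tail).foldl
            (fun m p => max m (p.2 - p.1)) 0 := pv_foldMax_ge_init _ 0
        rw [pv_foldMax_init ((b :: tR).zip tR) _ (le_trans hg1 (le_max_left _ _))]
        have hzipR : (b :: tR).zip tR = (dR.zip dR.tail) := by rw [hbtr]; rfl
        rw [hzipR, ihL, ihR]
        simp only []
        omega

-- ===== VERDICT (by name: the statement is the Claim_ definition above) =====
theorem maxWidthOfVerticalArea_spec : Claim_equal_maxWidthOfVerticalArea := by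
  intro points _ _
  unfold Spec_maxWidthOfVerticalArea maxWidthOfVerticalArea maxWidthOfVerticalArea_alt
  set l := points.map (fun a => PySem.List.pyGetD a 0 0) with hl
  set s := PySem.List.sorted l (fun x => x) false with hs
  have h1 : (PySem.List.pyRange 1 (s.length : Int) 1).foldl
      (fun m i =>
        if PySem.List.pyGetD s i 0 = PySem.List.pyGetD s (i - 1) 0 then m
        else max m (PySem.List.pyGetD s i 0 - PySem.List.pyGetD s (i - 1) 0)) 0
      = (s.zip s.tail).foldl (fun m p => if p.2 = p.1 then m else max m (p.2 - p.1)) 0 := by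
    rw [← pv_pairs_eq s, List.foldl_map]
  by_cases hnil : l = []
  · rw [if_pos hnil, h1]
    rw [hs, hnil]
    rfl
  · rw [if_neg hnil, h1, pv_foldSkip_eq_foldMax _ _ le_rfl, pv_foldMax_edup s 0 le_rfl]
    have hmem : ∀ x, x ∈ l ↔ x ∈ pvEdup s := by
      intro x
      rw [pv_edup_mem, hs, PySem.List.mem_sorted]
    exact (pv_gap_eq (pvEdup s).length (pvEdup s) l le_rfl hmem
      (pv_edup_pairwise_lt s (by simpa using PySem.List.sorted_pairwise l (fun x => x)))).symm
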